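-- pv_equiv track=rewrite | github.com/syseitz/predTED | utils/features.py | count_bulges
-- ===== SOURCE A (Python) =====
-- def count_bulges(structure: str) -> int:
--     stack = []
--     bulges = 0
--     for i, char in enumerate(structure):
--         if char == '(':
--             stack.append(i)
--         elif char == ')' and stack:
--             stack.pop()
--         elif char == '.' and stack:
--             if i + 1 < len(structure) and structure[i + 1] == ')':
--                 bulges += 1
--     return bulges
-- ===== SOURCE B (Python) =====
-- def count_bulges(structure: str) -> int:
--     # Pass 1: depths[i] = number of unmatched '(' strictly before index i (clamped at 0).
--     depths = []
--     d = 0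
--     for ch in structure:
--         depths.append(d)
--         if ch == '(':
--             d += 1
--         elif ch == ')' and d > 0:
--             d -= 1
--     # Pass 2: count '.' immediately followed by ')' at positive depth.
--     return sum(1 for a, b, dep in zip(structure, structure[1:], depths)
--                if a == '.' and b == ')' and dep > 0)
-- ===== Notes on version B (the rewrite author's own statement) =====
-- stated objective: alternative
-- what changed: Replaced the single interleaved stack loop by two passes: a first pass tabulating the clamped nesting depth before each index, then a zip of the string with its shift and the depth table counting '.' followed by ')' at positive depth.
import Mathlib
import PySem

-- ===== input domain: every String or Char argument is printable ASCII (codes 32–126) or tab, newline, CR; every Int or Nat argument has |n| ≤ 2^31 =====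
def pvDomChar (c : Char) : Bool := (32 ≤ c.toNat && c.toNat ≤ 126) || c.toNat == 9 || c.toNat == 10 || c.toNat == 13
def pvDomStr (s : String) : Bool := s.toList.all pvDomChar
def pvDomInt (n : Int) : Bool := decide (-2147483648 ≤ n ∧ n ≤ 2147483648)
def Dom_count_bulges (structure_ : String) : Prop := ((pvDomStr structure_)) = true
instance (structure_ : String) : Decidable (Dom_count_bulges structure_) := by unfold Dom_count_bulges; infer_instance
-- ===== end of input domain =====

-- B replaces A's single interleaved stack loop by two passes (a clamped-depth table, then a
-- zip-based count); objective: alternative decomposition, same O(n) cost.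

-- ===== PORT A =====
-- loop body of A, closed over the whole char list (Python's closure over `structure`);
-- `i + 1 < len(structure) and structure[i+1] == ')'` is ported as the bounds-checked access
-- pyGet? cs (i+1) == some ')' (exact, since i ≥ 0 here)
def pvStepA (cs : List Char) (st : List Int × Int) (p : Int × Char) : List Int × Int :=
  if p.2 == '(' then (p.1 :: st.1, st.2)
  else if p.2 == ')' && !st.1.isEmpty then (st.1.tail, st.2)
  else if p.2 == '.' && !st.1.isEmpty then
    (if PySem.List.pyGet? cs (p.1 + 1) == some ')' then (st.1, st.2 + 1) else (st.1, st.2))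
  else (st.1, st.2)

def count_bulges (structure_ : String) : Int :=
  let cs := structure_.toList
  ((PySem.List.enumerate cs 0).foldl (pvStepA cs) ([], 0)).2

-- ===== PORT B =====
-- first pass of B: append the current depth, then update it (clamped at 0)
def pvStepB (st : List Nat × Nat) (ch : Char) : List Nat × Nat :=
  (st.1 ++ [st.2],
   if ch == '(' then st.2 + 1
   else if ch == ')' && decide (0 < st.2) then st.2 - 1
   else st.2)

def count_bulges_alt (structure_ : String) : Int :=
  let cs := structure_.toList
  let depths := (cs.foldl pvStepB ([], 0)).1
  (((cs.zip (cs.drop 1)).zip depths).countP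
      (fun p => p.1.1 == '.' && p.1.2 == ')' && decide (0 < p.2)) : Int)

-- ===== PRECONDITION & SPEC =====
def Spec_count_bulges (structure_ : String) (out : Int) : Prop := out = count_bulges_alt structure_
instance (structure_ : String) (out : Int) : Decidable (Spec_count_bulges structure_ out) := by unfold Spec_count_bulges; infer_instance

-- ===== CLAIM (what is proved, stated in full; the proofs are below) =====
def Claim_equal_count_bulges : Prop := ∀ (structure_ : String), Dom_count_bulges structure_ → Spec_count_bulges structure_ (count_bulges structure_)

-- ===== LEMMAS AND PROOFS =====

-- proof-side helpers
def pvNd (c : Char) (d : Nat) : Nat :=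
  if c == '(' then d + 1 else if c == ')' && decide (0 < d) then d - 1 else d

def pvDlist : List Char → Nat → List Nat
  | [], _ => []
  | c :: rest, d => d :: pvDlist rest (pvNd c d)

def pvSpec : List Char → Nat → Int
  | [], _ => 0
  | c :: rest, d =>
      (if c == '.' && decide (0 < d) && (rest.head? == some ')') then 1 else 0)
        + pvSpec rest (pvNd c d)

theorem pvDepths_eq (cs : List Char) : ∀ (acc : List Nat) (d : Nat),
    (cs.foldl pvStepB (acc, d)).1 = acc ++ pvDlist cs d := by
  induction cs with
  | nil => intro acc d; simp [pvDlist]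
  | cons c rest ih =>
      intro acc d
      simp only [List.foldl_cons, pvStepB, pvDlist]
      rw [ih]
      simp [pvNd]

theorem pvB_count (cs : List Char) : ∀ (d : Nat),
    (((cs.zip (cs.drop 1)).zip (pvDlist cs d)).countP
        (fun p => p.1.1 == '.' && p.1.2 == ')' && decide (0 < p.2)) : Int) = pvSpec cs d := by
  induction cs with
  | nil => intro d; simp [pvSpec]
  | cons c rest ih =>
      intro d
      cases rest with
      | nil => simp [pvDlist, pvSpec]
      | cons c2 rest2 =>
          have h := ih (pvNd c d)
          simp only [List.drop_one, List.tail_cons, pvDlist] at h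
          simp only [List.drop_one, List.tail_cons, pvDlist, List.zip_cons_cons,
            List.countP_cons]
          push_cast
          rw [h]
          have hif : (if (c == '.' && c2 == ')' && decide (0 < d)) = true then (1:Int) else 0)
              = (if (c == '.' && decide (0 < d) && ((c2 :: rest2).head? == some ')')) = true
                 then (1:Int) else 0) := by
            by_cases hc : c = '.' <;> by_cases hc2 : c2 = ')' <;> by_cases hd : 0 < d <;>
              simp [hc, hc2, hd]
          rw [hif]
          conv_rhs => rw [pvSpec]
          omega

theorem pvA_loop (cs : List Char) : ∀ (rest : List Char) (k : Nat) (stack : List Int) (b : Int),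
    rest = cs.drop k →
    ((PySem.List.enumerate rest (k : Int)).foldl (pvStepA cs) (stack, b)).2
      = b + pvSpec rest stack.length := by
  intro rest
  induction rest with
  | nil => intro k stack b _; simp [PySem.List.enumerate_nil, pvSpec]
  | cons c rest' ih =>
      intro k stack b hdrop
      have hrest' : rest' = cs.drop (k + 1) := by
        have := congrArg List.tail hdrop
        simpa [List.tail_drop] using this
      have hget : PySem.List.pyGet? cs ((k : Int) + 1) = rest'.head? := by
        have h : ((k : Int) + 1) = ((k + 1 : Nat) : Int) := by push_cast; ring
        rw [h, PySem.List.pyGet?_natCast, hrest', ← List.head?_drop]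
      have hcast : ((k : Int) + 1) = ((k + 1 : Nat) : Int) := by push_cast; ring
      rw [PySem.List.enumerate_cons, List.foldl_cons]
      by_cases h1 : c = '('
      · subst h1
        simp only [pvStepA]
        rw [if_pos (by decide : (('(' : Char) == '(') = true)]
        rw [hcast, ih (k + 1) _ b hrest']
        simp [pvSpec, pvNd]
      · by_cases h2 : c = ')'
        · subst h2
          cases stack with
          | nil =>
              simp only [pvStepA]
              rw [if_neg (by decide), if_neg (by decide), if_neg (by decide)]
              rw [hcast, ih (k + 1) _ b hrest']
              simp [pvSpec, pvNd]
          | cons s0 srest =>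
              simp only [pvStepA]
              rw [if_neg (by decide), if_pos (by simp)]
              rw [hcast, ih (k + 1) _ b hrest']
              simp [pvSpec, pvNd]
        · by_cases h3 : c = '.'
          · subst h3
            cases stack with
            | nil =>
                simp only [pvStepA]
                rw [if_neg (by decide), if_neg (by decide), if_neg (by decide)]
                rw [hcast, ih (k + 1) _ b hrest']
                simp [pvSpec, pvNd]
            | cons s0 srest =>
                simp only [pvStepA, hget]
                rw [if_neg (by decide), if_neg (by simp), if_pos (by simp)]
                cases hcond : (rest'.head? == some ')') with
                | true =>
                    rw [if_pos rfl]
                    rw [hcast, ih (k + 1) _ (b + 1) hrest']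
                    simp [pvSpec, pvNd, hcond]
                    omega
                | false =>
                    rw [if_neg (by simp)]
                    rw [hcast, ih (k + 1) _ b hrest']
                    simp [pvSpec, pvNd, hcond]
          · simp only [pvStepA]
            rw [if_neg (by simp [h1]), if_neg (by simp [h2]), if_neg (by simp [h3])]
            rw [hcast, ih (k + 1) _ b hrest']
            simp [pvSpec, pvNd, h1, h2, h3]

-- ===== VERDICT (by name: the statement is the Claim_ definition above) =====
theorem count_bulges_spec : Claim_equal_count_bulges := by
  intro s _
  unfold Spec_count_bulges
  simp only [count_bulges, count_bulges_alt]
  have hA := pvA_loop s.toList s.toList 0 [] 0 (by simp)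
  norm_num at hA
  rw [hA, pvDepths_eq, List.nil_append, pvB_count]
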